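-- pv_equiv track=rewrite | github.com/LisaIU00/Evolutionary_Music | cost.py | equalDissonant
-- ===== SOURCE A (Python) =====
-- consonanza = [2,4,5,7,9,11,12,14]
--
-- def equalDissonant(element):
--     result = 0
--     dissonant = 0
--
--     for i in range(len(element)):
--         partial_r = 0
--         for j in range(i+1, len(element), 1):
--             if element[i] == element[j]:
--                 partial_r+=1
--
--             if abs(element[i] - element[j]) not in consonanza:
--                 dissonant += 1
--
--         if partial_r>0:
--             result += (partial_r+1)
--     return result, dissonant
-- ===== SOURCE B (Python) =====
-- consonanza = [2,4,5,7,9,11,12,14]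
--
-- def equalDissonant(element):
--     cnt = {}
--     for x in element:
--         cnt[x] = cnt.get(x, 0) + 1
--     n = len(element)
--     result = 0
--     for c in cnt.values():
--         if c >= 2:
--             result += c * (c + 1) // 2 - 1
--     cons = 0
--     for v, c in cnt.items():
--         for d in consonanza:
--             cons += c * cnt.get(v + d, 0)
--     dissonant = n * (n - 1) // 2 - cons
--     return result, dissonant
-- ===== Notes on version B (the rewrite author's own statement) =====
-- stated objective: faster
-- what changed: Replaced the O(n^2) all-pairs double loop with a single frequency-table pass: duplicate weight becomes a closed-form c*(c+1)//2-1 per value, and dissonant pairs become C(n,2) minus consonant pairs counted as cnt[v]*cnt[v+d] over the 8 consonant intervals.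
import Mathlib
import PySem

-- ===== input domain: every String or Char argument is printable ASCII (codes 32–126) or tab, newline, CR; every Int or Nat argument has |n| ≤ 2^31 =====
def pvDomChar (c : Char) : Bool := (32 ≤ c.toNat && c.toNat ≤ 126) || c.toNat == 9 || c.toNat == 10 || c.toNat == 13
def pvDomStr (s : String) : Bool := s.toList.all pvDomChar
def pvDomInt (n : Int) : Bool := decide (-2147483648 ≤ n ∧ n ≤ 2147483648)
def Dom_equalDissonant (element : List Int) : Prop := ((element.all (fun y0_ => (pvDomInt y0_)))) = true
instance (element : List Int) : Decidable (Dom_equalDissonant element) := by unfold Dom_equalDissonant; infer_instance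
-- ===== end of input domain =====

-- B replaces A's O(n^2) all-pairs double loop by one frequency table: a closed form per distinct
-- value for the duplicate weight, and C(n,2) minus consonant pairs counted via cnt[v]*cnt[v+d].

def consonanza : List Int := [2, 4, 5, 7, 9, 11, 12, 14]

-- ===== PORT A =====
def equalDissonant (element : List Int) : Int × Int :=
  (PySem.List.pyRange 0 (element.length : Int) 1).foldl
    (fun st i =>
      let inner :=
        (PySem.List.pyRange (i + 1) (element.length : Int) 1).foldl
          (fun (p : Int × Int) j =>
            (if PySem.List.pyGetD element i 0 = PySem.List.pyGetD element j 0 then p.1 + 1 else p.1,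
             if !consonanza.contains |PySem.List.pyGetD element i 0 - PySem.List.pyGetD element j 0| then p.2 + 1 else p.2))
          (0, st.2)
      (if inner.1 > 0 then st.1 + (inner.1 + 1) else st.1, inner.2))
    (0, 0)

-- ===== PORT B =====
def equalDissonant_alt (element : List Int) : Int × Int :=
  let cnt := element.foldl (fun (d : PySem.Dict Int Int) x => d.insert x (d.getD x 0 + 1)) PySem.Dict.empty
  let n : Int := (element.length : Int)
  let result := cnt.values.foldl
    (fun acc c => if c ≥ 2 then acc + (PySem.Int.floordiv (c * (c + 1)) 2 - 1) else acc) 0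
  let cons := cnt.items.foldl
    (fun acc vc => consonanza.foldl (fun acc2 d => acc2 + vc.2 * cnt.getD (vc.1 + d) 0) acc) 0
  (result, PySem.Int.floordiv (n * (n - 1)) 2 - cons)

-- ===== PRECONDITION & SPEC =====
def Spec_equalDissonant (element : List Int) (out : Int × Int) : Prop := out = equalDissonant_alt element
instance (element : List Int) (out : Int × Int) : Decidable (Spec_equalDissonant element out) := by unfold Spec_equalDissonant; infer_instance

-- ===== CLAIM (what is proved, stated in full; the proofs are below) =====
def Claim_equal_equalDissonant : Prop := ∀ (element : List Int), Dom_equalDissonant element → Spec_equalDissonant element (equalDissonant element)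

-- ===== LEMMAS AND PROOFS =====

-- closed-form weight of one multiplicity c, and the increment A's outer loop adds for one occurrence
def gDup (c : Int) : Int := if c ≥ 2 then PySem.Int.floordiv (c * (c + 1)) 2 - 1 else 0
def hDup (c : Int) : Int := if c > 0 then c + 1 else 0

def cN (l : List Int) (v : Int) : Int := (l.count v : Int)

def consCnt (l : List Int) (v : Int) : Int :=
  (consonanza.map (fun d => cN l v * cN l (v + d))).sum

def RSum (l : List Int) : Int := ∑ v ∈ l.toFinset, gDup (cN l v)
def KSum (l : List Int) : Int := ∑ v ∈ l.toFinset, consCnt l v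

-- structural characterisation of A's double loop: head-against-tail contribution plus recursion
def specA : List Int → Int × Int
  | [] => (0, 0)
  | x :: xs =>
    ((if cN xs x > 0 then cN xs x + 1 else 0) + (specA xs).1,
     ((xs.countP (fun y => !consonanza.contains |x - y|)) : Int) + (specA xs).2)

def stepA (element : List Int) (st : Int × Int) (i : Int) : Int × Int :=
  let inner :=
    (PySem.List.pyRange (i + 1) (element.length : Int) 1).foldl
      (fun (p : Int × Int) j =>
        (if PySem.List.pyGetD element i 0 = PySem.List.pyGetD element j 0 then p.1 + 1 else p.1,
         if !consonanza.contains |PySem.List.pyGetD element i 0 - PySem.List.pyGetD element j 0| then p.2 + 1 else p.2))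
      (0, st.2)
  (if inner.1 > 0 then st.1 + (inner.1 + 1) else st.1, inner.2)

def outerA (element : List Int) (st : Int × Int) : Int × Int :=
  (PySem.List.pyRange 0 (element.length : Int) 1).foldl (stepA element) st

lemma equalDissonant_eq_outerA (l : List Int) : equalDissonant l = outerA l (0, 0) := rfl

lemma stepA_shift (x : Int) (xs : List Int) (st : Int × Int) (k : Nat) :
    stepA (x :: xs) st (1 + (k : Int)) = stepA xs st (k : Int) := by
  unfold stepA
  have hg : PySem.List.pyGetD (x :: xs) (1 + (k : Int)) 0 = PySem.List.pyGetD xs (k : Int) 0 := by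
    rw [show (1 + (k : Int)) = ((k + 1 : Nat) : Int) by push_cast; ring]
    rw [PySem.List.pyGetD_natCast, PySem.List.pyGetD_natCast]
    simp
  rw [hg]
  rw [PySem.List.foldl_pyRange_pyGetD' (x :: xs) 0
      (fun (p : Int × Int) y =>
        (if PySem.List.pyGetD xs (k : Int) 0 = y then p.1 + 1 else p.1,
         if !consonanza.contains |PySem.List.pyGetD xs (k : Int) 0 - y| then p.2 + 1 else p.2))
      (0, st.2) (a := 1 + (k : Int) + 1) (by positivity)]
  rw [PySem.List.foldl_pyRange_pyGetD' xs 0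
      (fun (p : Int × Int) y =>
        (if PySem.List.pyGetD xs (k : Int) 0 = y then p.1 + 1 else p.1,
         if !consonanza.contains |PySem.List.pyGetD xs (k : Int) 0 - y| then p.2 + 1 else p.2))
      (0, st.2) (a := (k : Int) + 1) (by positivity)]
  have h1 : (1 + (k : Int) + 1).toNat = k + 2 := by omega
  have h2 : ((k : Int) + 1).toNat = k + 1 := by omega
  rw [h1, h2]
  rfl

lemma outerA_shift (x : Int) (xs : List Int) (st : Int × Int) :
    (PySem.List.pyRange 1 ((x :: xs).length : Int) 1).foldl (stepA (x :: xs)) st = outerA xs st := by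
  unfold outerA
  rw [PySem.List.pyRange_one, PySem.List.pyRange_one]
  have h1 : (((x :: xs).length : Int) - 1).toNat = xs.length := by simp
  have h2 : ((xs.length : Int) - 0).toNat = xs.length := by simp
  rw [h1, h2, List.foldl_map, List.foldl_map]
  apply PySem.List.foldl_congr_mem
  intro acc k _
  rw [stepA_shift]
  norm_num

lemma stepA_zero (x : Int) (xs : List Int) (st : Int × Int) :
    stepA (x :: xs) st 0 =
      (st.1 + (if cN xs x > 0 then cN xs x + 1 else 0),
       st.2 + ((xs.countP (fun y => !consonanza.contains |x - y|)) : Int)) := by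
  unfold stepA
  rw [PySem.List.foldl_pyRange_pyGetD' (x :: xs) 0
      (fun (p : Int × Int) y =>
        (if PySem.List.pyGetD (x :: xs) 0 0 = y then p.1 + 1 else p.1,
         if !consonanza.contains |PySem.List.pyGetD (x :: xs) 0 0 - y| then p.2 + 1 else p.2))
      (0, st.2) (a := 0 + 1) (by norm_num)]
  have hx : PySem.List.pyGetD (x :: xs) 0 0 = x := by
    simpa using PySem.List.pyGetD_natCast (x :: xs) 0 0
  rw [hx]
  have hd : (0 + 1 : Int).toNat = 1 := by norm_num
  rw [hd]
  simp only [List.drop_succ_cons, List.drop_zero]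
  rw [PySem.List.foldl_prod_mk (f := fun a y => if x = y then a + 1 else a)
      (g := fun a y => if !consonanza.contains |x - y| then a + 1 else a)]
  rw [PySem.List.foldl_ite_add_one (fun y => x = y) xs 0,
      PySem.List.foldl_if_add_one (fun y => !consonanza.contains |x - y|) xs st.2]
  have hc : (List.countP (fun y => decide (x = y)) xs) = xs.count x := by
    rw [List.count]
    apply List.countP_congr
    intro y _
    by_cases h : x = y
    · simp [h]
    · simp [h, Ne.symm h]
  rw [hc]
  refine Prod.ext ?_ ?_ <;> simp only [cN] <;> simp <;> split_ifs <;> omega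

lemma outerA_eq_specA (l : List Int) : ∀ st : Int × Int,
    outerA l st = (st.1 + (specA l).1, st.2 + (specA l).2) := by
  induction l with
  | nil =>
    intro st
    unfold outerA
    rw [PySem.List.pyRange_one_eq_nil (by simp)]
    simp [specA]
  | cons x xs ih =>
    intro st
    unfold outerA
    rw [PySem.List.pyRange_one_cons (by exact_mod_cast Nat.succ_pos xs.length)]
    rw [List.foldl_cons]
    have : (PySem.List.pyRange (0 + 1) ((x :: xs).length : Int) 1) = (PySem.List.pyRange 1 ((x :: xs).length : Int) 1) := by norm_num
    rw [this, outerA_shift, ih, stepA_zero]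
    simp only [specA]
    refine Prod.ext ?_ ?_ <;> simp <;> try ring

lemma A_eq_specA (l : List Int) : equalDissonant l = specA l := by
  rw [equalDissonant_eq_outerA, outerA_eq_specA]
  simp

lemma gDup_succ (c : Nat) : gDup ((c : Int) + 1) = gDup (c : Int) + hDup (c : Int) := by
  unfold gDup hDup
  rw [PySem.Int.floordiv_eq_ediv_of_pos (by norm_num), PySem.Int.floordiv_eq_ediv_of_pos (by norm_num)]
  match c with
  | 0 => norm_num
  | 1 => norm_num
  | (n+2) =>
    have h : ((n+2 : Nat) : Int) + 1 ≥ 2 := by push_cast; omega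
    rw [if_pos h, if_pos (by push_cast; omega), if_pos (by push_cast; omega)]
    have e : (((n+2:Nat) : Int) + 1) * (((n+2:Nat) : Int) + 1 + 1)
        = ((n+2:Nat) : Int) * (((n+2:Nat) : Int) + 1) + (((n+2:Nat):Int) + 1) * 2 := by ring
    rw [e, Int.add_mul_ediv_right _ _ (by norm_num)]
    push_cast
    ring

lemma cN_cons (y : Int) (l : List Int) (v : Int) :
    cN (y :: l) v = cN l v + (if v = y then 1 else 0) := by
  by_cases h : v = y
  · simp [cN, h]
  · simp [cN, h, Ne.symm h]

lemma cN_eq_zero_of_not_mem {l : List Int} {v : Int} (h : v ∉ l) : cN l v = 0 := by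
  unfold cN
  simp [List.count_eq_zero.2 h]

lemma gDup_succ' (l : List Int) (x : Int) :
    gDup (cN l x + 1) = gDup (cN l x) + hDup (cN l x) := gDup_succ (l.count x)

lemma RSum_cons (x : Int) (xs : List Int) :
    RSum (x :: xs) = RSum xs + hDup (cN xs x) := by
  unfold RSum
  rw [List.toFinset_cons]
  by_cases hx : x ∈ xs.toFinset
  · rw [Finset.insert_eq_self.2 hx]
    rw [← Finset.add_sum_erase _ _ hx, ← Finset.add_sum_erase _ (fun v => gDup (cN xs v)) hx]
    have h1 : cN (x :: xs) x = cN xs x + 1 := by rw [cN_cons]; simp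
    have h2 : ∀ v ∈ xs.toFinset.erase x, gDup (cN (x :: xs) v) = gDup (cN xs v) := by
      intro v hv
      rw [cN_cons, if_neg (Finset.ne_of_mem_erase hv), add_zero]
    rw [Finset.sum_congr rfl h2, h1, gDup_succ']
    ring
  · rw [Finset.sum_insert hx]
    have h0 : cN xs x = 0 := cN_eq_zero_of_not_mem (by simpa using hx)
    have h1 : cN (x :: xs) x = 1 := by rw [cN_cons, h0]; simp
    have h2 : ∀ v ∈ xs.toFinset, gDup (cN (x :: xs) v) = gDup (cN xs v) := by
      intro v hv
      rw [cN_cons, if_neg, add_zero]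
      intro h; exact hx (h ▸ hv)
    rw [Finset.sum_congr rfl h2, h1, h0]
    simp [gDup, hDup]

lemma consonanza_pos : ∀ d ∈ consonanza, 0 < d := by decide

lemma term_expand (x : Int) (xs : List Int) (v d : Int) (hd : 0 < d) :
    cN (x :: xs) v * cN (x :: xs) (v + d) =
      cN xs v * cN xs (v + d) + (if v = x then cN xs (x + d) else 0)
        + (if v = x - d then cN xs (x - d) else 0) := by
  rw [cN_cons, cN_cons]
  by_cases h1 : v = x
  · rw [h1, if_pos (rfl : x = x), if_neg (show x + d ≠ x by omega),
        if_pos (rfl : x = x), if_neg (show x ≠ x - d by omega)]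
    ring
  · by_cases h2 : v = x - d
    · have hvd : v + d = x := by omega
      rw [if_neg h1, hvd, if_pos (rfl : x = x), if_neg h1, if_pos h2, h2]
      ring
    · rw [if_neg h1, if_neg (show v + d ≠ x by omega), if_neg h1, if_neg h2]
      ring

lemma consCnt_cons (x : Int) (xs : List Int) (v : Int) :
    consCnt (x :: xs) v =
      consCnt xs v + (if v = x then (consonanza.map (fun d => cN xs (x + d))).sum else 0)
        + (consonanza.map (fun d => if v = x - d then cN xs (x - d) else 0)).sum := by
  unfold consCnt
  rw [show (consonanza.map (fun d => cN (x :: xs) v * cN (x :: xs) (v + d)))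
      = (consonanza.map (fun d => cN xs v * cN xs (v + d) + (if v = x then cN xs (x + d) else 0)
          + (if v = x - d then cN xs (x - d) else 0))) from
    List.map_congr_left (fun d hd => term_expand x xs v d (consonanza_pos d hd))]
  rw [PySem.List.sum_map_add_int, PySem.List.sum_map_add_int]
  congr 1
  by_cases h : v = x
  · simp [h]
  · simp [h]

lemma finset_sum_list_sum (s : Finset Int) (L : List Int) (f : Int → Int → Int) :
    ∑ v ∈ s, (L.map (f v)).sum = (L.map (fun d => ∑ v ∈ s, f v d)).sum := by
  induction L with
  | nil => simp
  | cons d L ih => simp [Finset.sum_add_distrib, ih]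

lemma countP_eq_literal (a : Int) :
    ((consonanza.countP (fun d => d == a)) : Int) = if a ∈ consonanza then 1 else 0 := by
  have hc : consonanza.countP (fun d => d == a) = consonanza.count a := rfl
  rw [hc]
  by_cases ha : a ∈ consonanza
  · rw [List.count_eq_one_of_mem (by decide) ha, if_pos ha]
    rfl
  · rw [List.count_eq_zero_of_not_mem ha, if_neg ha]
    rfl

lemma pair_indicator (x y : Int) :
    (consonanza.map (fun d => if x + d = y then (1:Int) else 0)).sum
      + (consonanza.map (fun d => if x - d = y then (1:Int) else 0)).sum
      = if consonanza.contains |x - y| then (1:Int) else 0 := by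
  have e1 : (consonanza.map (fun d => if x + d = y then (1:Int) else 0)).sum
      = ((consonanza.countP (fun d => d == y - x)) : Int) := by
    rw [← PySem.List.sum_map_ite_one_zero (fun d => d == y - x) consonanza]
    apply congrArg
    apply List.map_congr_left
    intro d _
    by_cases h : x + d = y
    · rw [if_pos h, if_pos (by simpa using (by omega : d = y - x))]
    · rw [if_neg h, if_neg (by simp; omega)]
  have e2 : (consonanza.map (fun d => if x - d = y then (1:Int) else 0)).sum
      = ((consonanza.countP (fun d => d == x - y)) : Int) := by
    rw [← PySem.List.sum_map_ite_one_zero (fun d => d == x - y) consonanza]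
    apply congrArg
    apply List.map_congr_left
    intro d _
    by_cases h : x - d = y
    · rw [if_pos h, if_pos (by simpa using (by omega : d = x - y))]
    · rw [if_neg h, if_neg (by simp; omega)]
  rw [e1, e2, countP_eq_literal, countP_eq_literal, List.contains_eq_mem]
  rcases le_total y x with h | h
  · rw [abs_of_nonneg (by omega : (0:Int) ≤ x - y)]
    have hneg : y - x ∉ consonanza ∨ y - x = x - y := by
      by_cases hm : y - x ∈ consonanza
      · right; have := consonanza_pos _ hm; omega
      · left; exact hm
    rcases hneg with hn | he
    · rw [if_neg hn]
      by_cases hm : x - y ∈ consonanza <;> simp [hm]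
    · have hxy : x = y := by omega
      subst hxy
      simp
      decide
  · rw [abs_of_nonpos (by omega : x - y ≤ 0), neg_sub]
    have hneg : x - y ∉ consonanza ∨ y - x = x - y := by
      by_cases hm : x - y ∈ consonanza
      · right; have := consonanza_pos _ hm; omega
      · left; exact hm
    rcases hneg with hn | he
    · rw [if_neg hn]
      by_cases hm : y - x ∈ consonanza <;> simp [hm]
    · have hxy : x = y := by omega
      subst hxy
      simp
      decide

lemma count_consonant (x : Int) (xs : List Int) :
    (consonanza.map (fun d => cN xs (x + d))).sum + (consonanza.map (fun d => cN xs (x - d))).sum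
      = ((xs.countP (fun y => consonanza.contains |x - y|)) : Int) := by
  induction xs with
  | nil => simp [cN]
  | cons y ys ih =>
    have e1 : (consonanza.map (fun d => cN (y :: ys) (x + d))).sum
        = (consonanza.map (fun d => cN ys (x + d))).sum
          + (consonanza.map (fun d => if x + d = y then (1:Int) else 0)).sum := by
      rw [← PySem.List.sum_map_add_int]
      apply congrArg
      apply List.map_congr_left
      intro d _
      rw [cN_cons]
    have e2 : (consonanza.map (fun d => cN (y :: ys) (x - d))).sum
        = (consonanza.map (fun d => cN ys (x - d))).sum
          + (consonanza.map (fun d => if x - d = y then (1:Int) else 0)).sum := by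
      rw [← PySem.List.sum_map_add_int]
      apply congrArg
      apply List.map_congr_left
      intro d _
      rw [cN_cons]
    rw [e1, e2, List.countP_cons]
    push_cast
    have hp := pair_indicator x y
    by_cases hb : consonanza.contains |x - y|
    · rw [if_pos hb] at hp ⊢
      omega
    · rw [if_neg hb] at hp ⊢
      omega

lemma KSum_cons (x : Int) (xs : List Int) :
    KSum (x :: xs) = KSum xs + ((xs.countP (fun y => consonanza.contains |x - y|)) : Int) := by
  unfold KSum
  rw [List.toFinset_cons]
  have expand : ∀ v ∈ insert x xs.toFinset, consCnt (x :: xs) v =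
      consCnt xs v + (if v = x then (consonanza.map (fun d => cN xs (x + d))).sum else 0)
        + (consonanza.map (fun d => if v = x - d then cN xs (x - d) else 0)).sum :=
    fun v _ => consCnt_cons x xs v
  rw [Finset.sum_congr rfl expand]
  rw [Finset.sum_add_distrib, Finset.sum_add_distrib]
  have t1 : ∑ v ∈ insert x xs.toFinset, consCnt xs v = KSum xs := by
    unfold KSum
    by_cases hx : x ∈ xs.toFinset
    · rw [Finset.insert_eq_self.2 hx]
    · rw [Finset.sum_insert hx]
      have : consCnt xs x = 0 := by
        unfold consCnt
        have : ∀ d ∈ consonanza, cN xs x * cN xs (x + d) = 0 := by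
          intro d _
          rw [cN_eq_zero_of_not_mem (by simpa using hx), zero_mul]
        rw [List.map_congr_left this]
        simp
      rw [this, zero_add]
  have t2 : ∑ v ∈ insert x xs.toFinset,
      (if v = x then (consonanza.map (fun d => cN xs (x + d))).sum else 0)
      = (consonanza.map (fun d => cN xs (x + d))).sum := by
    rw [Finset.sum_ite_eq' (insert x xs.toFinset) x
      (fun _ => (consonanza.map (fun d => cN xs (x + d))).sum)]
    rw [if_pos (Finset.mem_insert_self x xs.toFinset)]
  have t3 : ∑ v ∈ insert x xs.toFinset,
      (consonanza.map (fun d => if v = x - d then cN xs (x - d) else 0)).sum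
      = (consonanza.map (fun d => cN xs (x - d))).sum := by
    rw [finset_sum_list_sum]
    apply congrArg
    apply List.map_congr_left
    intro d _
    rw [Finset.sum_ite_eq' (insert x xs.toFinset) (x - d) (fun _ => cN xs (x - d))]
    by_cases hm : x - d ∈ insert x xs.toFinset
    · rw [if_pos hm]
    · rw [if_neg hm]
      rw [cN_eq_zero_of_not_mem]
      intro hmem
      exact hm (Finset.mem_insert_of_mem (List.mem_toFinset.2 hmem))
  rw [t1, t2, t3]
  rw [show KSum xs + (List.map (fun d => cN xs (x + d)) consonanza).sum
        + (List.map (fun d => cN xs (x - d)) consonanza).sum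
      = KSum xs + ((List.map (fun d => cN xs (x + d)) consonanza).sum
        + (List.map (fun d => cN xs (x - d)) consonanza).sum) from by ring]
  rw [count_consonant]
  rfl

lemma countP_not (p : Int → Bool) (l : List Int) :
    l.countP (fun y => !p y) + l.countP p = l.length := by
  induction l with
  | nil => simp
  | cons y ys ih =>
    rw [List.countP_cons, List.countP_cons]
    cases hp : p y <;> simp <;> try omega

lemma specA_fst (l : List Int) : (specA l).1 = RSum l := by
  induction l with
  | nil => simp [specA, RSum]
  | cons x xs ih =>
    rw [RSum_cons]
    show (if cN xs x > 0 then cN xs x + 1 else 0) + (specA xs).1 = _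
    rw [ih]
    unfold hDup
    ring

lemma floordiv_succ_tri (m : Int) :
    PySem.Int.floordiv ((m + 1) * (m + 1 - 1)) 2 = PySem.Int.floordiv (m * (m - 1)) 2 + m := by
  rw [PySem.Int.floordiv_eq_ediv_of_pos (by norm_num), PySem.Int.floordiv_eq_ediv_of_pos (by norm_num)]
  rw [show (m + 1) * (m + 1 - 1) = m * (m - 1) + m * 2 from by ring]
  rw [Int.add_mul_ediv_right _ _ (by norm_num)]

lemma specA_snd (l : List Int) :
    (specA l).2 = PySem.Int.floordiv ((l.length : Int) * ((l.length : Int) - 1)) 2 - KSum l := by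
  induction l with
  | nil => simp [specA, KSum]
  | cons x xs ih =>
    rw [KSum_cons]
    show ((xs.countP (fun y => !consonanza.contains |x - y|)) : Int) + (specA xs).2 = _
    rw [ih]
    have hl : (((x :: xs).length : Int)) = (xs.length : Int) + 1 := by simp
    rw [hl, floordiv_succ_tri]
    have hc := countP_not (fun y => consonanza.contains |x - y|) xs
    have hc' : ((xs.countP (fun y => !consonanza.contains |x - y|)) : Int)
        + ((xs.countP (fun y => consonanza.contains |x - y|)) : Int) = (xs.length : Int) := by
      exact_mod_cast hc
    omega

lemma toFinset_ofList (l : List Int) : (PySem.Set.ofList l).toFinset = l.toFinset := by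
  apply Finset.ext
  intro a
  simp [List.mem_toFinset, PySem.Set.mem_ofList]

lemma sum_over_ofList (l : List Int) (f : Int → Int) :
    ((PySem.Set.ofList l).map f).sum = ∑ v ∈ l.toFinset, f v := by
  rw [← List.sum_toFinset f (PySem.Set.nodup_ofList l), toFinset_ofList]

lemma B_characterize (l : List Int) :
    equalDissonant_alt l =
      (RSum l, PySem.Int.floordiv ((l.length : Int) * ((l.length : Int) - 1)) 2 - KSum l) := by
  unfold equalDissonant_alt
  rw [PySem.Dict.foldl_insert_getD_add_one_eq_counter]
  simp only [PySem.Dict.values, PySem.Dict.items_counter, List.map_map]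
  refine Prod.ext ?_ ?_
  · show (((PySem.Set.ofList l).map (Prod.snd ∘ fun k => (k, (l.count k : Int)))).foldl
      (fun acc c => if c ≥ 2 then acc + (PySem.Int.floordiv (c * (c + 1)) 2 - 1) else acc) 0) = _
    rw [List.foldl_map]
    rw [PySem.List.foldl_congr_mem (PySem.Set.ofList l)
      (fun acc k => (fun acc c => if c ≥ 2 then acc + (PySem.Int.floordiv (c * (c + 1)) 2 - 1) else acc) acc ((Prod.snd ∘ fun k => (k, (l.count k : Int))) k))
      (fun acc k => acc + gDup (cN l k)) 0
      (by
        intro acc k _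
        show (if (l.count k : Int) ≥ 2 then acc + (PySem.Int.floordiv ((l.count k : Int) * ((l.count k : Int) + 1)) 2 - 1) else acc) = acc + gDup (cN l k)
        unfold gDup cN
        split_ifs <;> ring)]
    rw [PySem.List.foldl_add]
    rw [sum_over_ofList l (fun v => gDup (cN l v))]
    rw [zero_add]
    rfl
  · show PySem.Int.floordiv ((l.length : Int) * ((l.length : Int) - 1)) 2 -
      (((PySem.Set.ofList l).map (fun k => (k, (l.count k : Int)))).foldl
        (fun acc vc => consonanza.foldl (fun acc2 d => acc2 + vc.2 * (PySem.Dict.counter l).getD (vc.1 + d) 0) acc) 0) = _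
    rw [List.foldl_map]
    rw [PySem.List.foldl_congr_mem (PySem.Set.ofList l)
      (fun acc k => consonanza.foldl (fun acc2 d => acc2 + ((k, (l.count k : Int)).2) * (PySem.Dict.counter l).getD ((k, (l.count k : Int)).1 + d) 0) acc)
      (fun acc k => acc + consCnt l k) 0
      (by
        intro acc k _
        show consonanza.foldl (fun acc2 d => acc2 + (l.count k : Int) * (PySem.Dict.counter l).getD (k + d) 0) acc = acc + consCnt l k
        rw [PySem.List.foldl_congr_mem consonanza
          (fun acc2 d => acc2 + (l.count k : Int) * (PySem.Dict.counter l).getD (k + d) 0)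
          (fun acc2 d => acc2 + cN l k * cN l (k + d)) acc
          (by
            intro acc2 d _
            show acc2 + (l.count k : Int) * (PySem.Dict.counter l).getD (k + d) 0
              = acc2 + cN l k * cN l (k + d)
            rw [PySem.Dict.getD_counter]
            rfl)]
        rw [PySem.List.foldl_add]
        rfl)]
    rw [PySem.List.foldl_add]
    rw [sum_over_ofList l (fun v => consCnt l v)]
    rw [zero_add]
    rfl

-- ===== VERDICT (by name: the statement is the Claim_ definition above) =====
theorem equalDissonant_spec : Claim_equal_equalDissonant := by
  intro element _
  unfold Spec_equalDissonant
  rw [A_eq_specA, B_characterize]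
  exact Prod.ext (specA_fst element) (specA_snd element)
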